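-- pv_equiv track=rewrite | github.com/mewhhaha/spirdo | scripts/parity/materialize_cts_backlog_fixtures.py | strip_template_expressions
-- ===== SOURCE A (Python) =====
-- def strip_template_expressions(source: str) -> tuple[str, int]:
--     out: list[str] = []
--     idx = 0
--     length = len(source)
--     placeholder_count = 0
--     while idx < length:
--         if source[idx : idx + 2] != "${":
--             out.append(source[idx])
--             idx += 1
--             continue
--         idx += 2
--         placeholder_count += 1
--         depth = 0
--         while idx < length:
--             ch = source[idx]
--             if ch == "{":
--                 depth += 1
--             elif ch == "}":
--                 if depth == 0:
--                     idx += 1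
--                     break
--                 depth -= 1
--             idx += 1
--         out.append("0")
--     return "".join(out), placeholder_count
-- ===== SOURCE B (Python) =====
-- def strip_template_expressions(source: str) -> tuple[str, int]:
--     # One-pass character DFA: modes are "outside" (with a pending-'$' flag)
--     # and "inside a placeholder at brace depth d"; no index arithmetic, no slices.
--     out: list[str] = []
--     placeholder_count = 0
--     pending = False          # we have seen a '$' that is not yet emitted
--     depth = None             # None = outside a placeholder, int = inside at that depth
--     for ch in source:
--         if depth is not None:
--             if ch == "{":
--                 depth += 1
--             elif ch == "}":
--                 if depth == 0:
--                     depth = None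
--                 else:
--                     depth -= 1
--         elif pending:
--             if ch == "{":
--                 out.append("0")
--                 placeholder_count += 1
--                 depth = 0
--                 pending = False
--             elif ch == "$":
--                 out.append("$")
--             else:
--                 out.append("$")
--                 out.append(ch)
--                 pending = False
--         else:
--             if ch == "$":
--                 pending = True
--             else:
--                 out.append(ch)
--     if pending:
--         out.append("$")
--     return "".join(out), placeholder_count
-- ===== Notes on version B (the rewrite author's own statement) =====
-- stated objective: alternative
-- what changed: Replaced A's index-based outer while loop with per-position slice comparison and a nested inner scanning loop by a single one-pass character DFA (outside-with-pending-'$' / inside-at-depth states) folded over the string.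
import Mathlib
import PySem

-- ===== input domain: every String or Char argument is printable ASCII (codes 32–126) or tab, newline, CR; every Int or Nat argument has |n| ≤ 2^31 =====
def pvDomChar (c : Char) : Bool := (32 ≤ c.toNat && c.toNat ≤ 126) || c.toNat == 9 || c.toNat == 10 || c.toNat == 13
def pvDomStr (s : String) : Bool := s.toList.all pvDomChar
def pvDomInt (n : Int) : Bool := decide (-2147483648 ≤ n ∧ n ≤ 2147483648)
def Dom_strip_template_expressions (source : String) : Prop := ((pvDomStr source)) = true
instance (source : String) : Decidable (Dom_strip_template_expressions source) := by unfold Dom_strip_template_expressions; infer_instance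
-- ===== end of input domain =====

-- B replaces A's index-based outer loop + nested placeholder scan by a one-pass character DFA; same cost, different structure (objective: alternative).

-- ===== PORT A =====
-- inner while loop of A: scans the placeholder body, returns the remaining suffix after the closing '}'
def innerA : List Char → Int → List Char
  | [], _ => []
  | c :: cs, d =>
    if c = '{' then innerA cs (d + 1)
    else if c = '}' then (if d = 0 then cs else innerA cs (d - 1))
    else innerA cs d

theorem innerA_length_le (cs : List Char) : ∀ d : Int, (innerA cs d).length ≤ cs.length := by
  induction cs with
  | nil => intro d; simp [innerA]
  | cons c cs ih =>
    intro d
    simp only [innerA, List.length_cons]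
    split_ifs
    · exact le_trans (ih _) (Nat.le_succ _)
    · exact Nat.le_succ _
    · exact le_trans (ih _) (Nat.le_succ _)
    · exact le_trans (ih _) (Nat.le_succ _)

-- outer while loop of A: 'source[idx:idx+2] = "${"' becomes the head/second-char test on the remaining suffix
def outerA (cs : List Char) : List Char × Int :=
  match cs with
  | [] => ([], 0)
  | c :: rest =>
    if c = '$' ∧ rest.head? = some '{' then
      let r := outerA (innerA rest.tail 0)
      ('0' :: r.1, r.2 + 1)
    else
      let r := outerA rest
      (c :: r.1, r.2)
termination_by cs.length
decreasing_by
  · have h1 := innerA_length_le rest.tail 0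
    have h2 : rest.tail.length ≤ rest.length := by cases rest <;> simp
    simp; omega
  · simp

def strip_template_expressions (source : String) : String × Int :=
  let r := outerA source.toList
  (String.mk r.1, r.2)

-- ===== PORT B =====
-- DFA mode: outside a placeholder (pending = an unemitted '$' was seen) or inside at brace depth d
inductive BMode where
  | outm : Bool → BMode
  | inm : Int → BMode
deriving DecidableEq, Repr

-- one step of Source B's for-loop body on state (out, placeholder_count, mode)
def stepB (st : List Char × Int × BMode) (ch : Char) : List Char × Int × BMode :=
  match st with
  | (out, cnt, BMode.inm d) =>
    if ch = '{' then (out, cnt, BMode.inm (d + 1))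
    else if ch = '}' then
      (if d = 0 then (out, cnt, BMode.outm false) else (out, cnt, BMode.inm (d - 1)))
    else (out, cnt, BMode.inm d)
  | (out, cnt, BMode.outm true) =>
    if ch = '{' then (out ++ ['0'], cnt + 1, BMode.inm 0)
    else if ch = '$' then (out ++ ['$'], cnt, BMode.outm true)
    else (out ++ ['$', ch], cnt, BMode.outm false)
  | (out, cnt, BMode.outm false) =>
    if ch = '$' then (out, cnt, BMode.outm true)
    else (out ++ [ch], cnt, BMode.outm false)

-- Source B's epilogue: flush a pending '$' and join
def finishB (st : List Char × Int × BMode) : String × Int :=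
  match st with
  | (out, cnt, BMode.outm true) => (String.mk (out ++ ['$']), cnt)
  | (out, cnt, _) => (String.mk out, cnt)

def strip_template_expressions_alt (source : String) : String × Int :=
  finishB (source.toList.foldl stepB ([], 0, BMode.outm false))

-- ===== PRECONDITION & SPEC =====
def Spec_strip_template_expressions (source : String) (out : String × Int) : Prop := out = strip_template_expressions_alt source
instance (source : String) (out : String × Int) : Decidable (Spec_strip_template_expressions source out) := by unfold Spec_strip_template_expressions; infer_instance

-- ===== CLAIM (what is proved, stated in full; the proofs are below) =====
def Claim_equal_strip_template_expressions : Prop := ∀ (source : String), Dom_strip_template_expressions source → Spec_strip_template_expressions source (strip_template_expressions source)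

-- ===== LEMMAS AND PROOFS =====

def mergeR (out : List Char) (cnt : Int) (r : List Char × Int) : String × Int :=
  (String.mk (out ++ r.1), cnt + r.2)

-- while inside a placeholder, B's fold agrees with A's inner scan followed by the outside fold
theorem inner_fold (cs : List Char) : ∀ (d : Int) (out : List Char) (cnt : Int),
    finishB (cs.foldl stepB (out, cnt, BMode.inm d)) =
    finishB ((innerA cs d).foldl stepB (out, cnt, BMode.outm false)) := by
  induction cs with
  | nil => intro d out cnt; simp [innerA, finishB]
  | cons c cs ih =>
    intro d out cnt
    simp only [innerA, List.foldl_cons, stepB]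
    split_ifs <;> simp_all

theorem main_fold : ∀ (n : ℕ) (cs : List Char), cs.length ≤ n →
    (∀ (out : List Char) (cnt : Int),
      finishB (cs.foldl stepB (out, cnt, BMode.outm false)) = mergeR out cnt (outerA cs)) ∧
    (∀ (out : List Char) (cnt : Int),
      finishB (cs.foldl stepB (out, cnt, BMode.outm true)) = mergeR out cnt (outerA ('$' :: cs))) := by
  intro n
  induction n with
  | zero =>
    intro cs hlen
    have hcs : cs = [] := by cases cs <;> simp_all
    subst hcs
    constructor <;> intro out cnt <;> simp [outerA, finishB, mergeR]
  | succ n ih =>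
    intro cs hlen
    constructor
    · intro out cnt
      cases cs with
      | nil => simp [outerA, finishB, mergeR]
      | cons c cs' =>
        by_cases hc : c = '$'
        · subst hc
          simp only [List.foldl_cons, stepB, reduceIte]
          have hQ := (ih cs' (by simp at hlen; omega)).2 out cnt
          rw [hQ]
        · simp only [List.foldl_cons, stepB, if_neg hc]
          have hP := (ih cs' (by simp at hlen; omega)).1 (out ++ [c]) cnt
          rw [hP]
          have hcond : ¬ (c = '$' ∧ cs'.head? = some '{') := by
            intro h; exact hc h.1
          simp [outerA, hcond, mergeR]
    · intro out cnt
      cases cs with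
      | nil => simp [outerA, finishB, mergeR]
      | cons c cs' =>
        by_cases hbr : c = '{'
        · subst hbr
          simp only [List.foldl_cons, stepB, reduceIte]
          rw [inner_fold]
          have hP := (ih (innerA cs' 0) (by
            have := innerA_length_le cs' 0
            simp at hlen; omega)).1 (out ++ ['0']) (cnt + 1)
          rw [hP]
          have hcond : ('$' : Char) = '$' ∧ (('{' :: cs') : List Char).head? = some '{' := by simp
          simp only [outerA, if_pos hcond, mergeR]
          simp
          omega
        · by_cases hd : c = '$'
          · subst hd
            have hne : ¬ (('$' : Char) = '{') := by decide
            simp only [List.foldl_cons, stepB, if_neg hne, reduceIte]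
            have hQ := (ih cs' (by simp at hlen; omega)).2 (out ++ ['$']) cnt
            rw [hQ]
            have hcond : ¬ (('$' : Char) = '$' ∧ (('$' :: cs') : List Char).head? = some '{') := by
              simp
            conv_rhs => rw [outerA]
            rw [if_neg hcond]
            simp [mergeR]
          · simp only [List.foldl_cons, stepB, if_neg hbr, if_neg hd]
            have hP := (ih cs' (by simp at hlen; omega)).1 (out ++ ['$', c]) cnt
            rw [hP]
            have hcond1 : ¬ (('$' : Char) = '$' ∧ ((c :: cs') : List Char).head? = some '{') := by
              simp [hbr]
            have hcond2 : ¬ (c = '$' ∧ cs'.head? = some '{') := by intro h; exact hd h.1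
            conv_rhs => rw [outerA]
            rw [if_neg hcond1]
            simp only [outerA, if_neg hcond2, mergeR]
            simp

-- ===== VERDICT (by name: the statement is the Claim_ definition above) =====
theorem strip_template_expressions_spec : Claim_equal_strip_template_expressions := by
  intro source _
  unfold Spec_strip_template_expressions strip_template_expressions strip_template_expressions_alt
  have h := (main_fold source.toList.length source.toList le_rfl).1 [] 0
  rw [h]
  simp [mergeR]
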